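-- pv_equiv track=rewrite | github.com/sasdf/geetest-solver | track.py | userResponse
-- ===== SOURCE A (Python) =====
-- def userResponse(lastPos, challenge):
--     """
--     Calculate `userresponse` field.
--
--     >>> userResponse(42, '4130c29e37423c27834e9a59115c40195m')
--     'cccc000011'
--     """
--
--     tail = [ord(c) for c in challenge[32:34]]
--     tail = [c - ord('0') if c <= ord('9') else c - ord('W') for c in tail]
--     lastPos += 36 * tail[0] + tail[1]
--
--     symbol = list(set(challenge))
--     symbol.sort(key=lambda c: challenge.index(c))
--     symbol = reversed(symbol[:5])
--
--     multiplier = [50, 10, 5, 2, 1]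
--     result = ''
--     for s, m in zip(symbol, multiplier):
--         result += s * (lastPos // m)
--         lastPos %= m
--     return result
-- ===== SOURCE B (Python) =====
-- def userResponse(lastPos, challenge):
--     """Calculate `userresponse` field (closed-form mixed-radix digits, prepend assembly)."""
--     pos = lastPos + 36 * _dec(challenge[32]) + _dec(challenge[33])
--     # independent closed-form digits of pos in the mixed radix 50/10/5/2/1
--     counts = (pos // 50, pos // 10 % 5, pos // 5 % 2, pos % 5 // 2, pos % 5 % 2)
--     syms = list(dict.fromkeys(challenge))[:5]
--     k = len(syms)
--     parts = []
--     for i, s in enumerate(syms):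
--         parts.insert(0, s * counts[k - 1 - i])
--     return ''.join(parts)
--
--
-- def _dec(ch):
--     o = ord(ch)
--     return o - 48 if o <= 57 else o - 87
-- ===== Notes on version B (the rewrite author's own statement) =====
-- stated objective: alternative
-- what changed: A orders symbols via list(set(challenge)) plus a sort keyed by repeated challenge.index scans and builds the string with a sequential remainder-carrying greedy divmod loop; B dedups in one pass with dict.fromkeys and replaces the chained divmod state machine entirely with independent closed-form mixed-radix digit formulas (pos//50, pos//10%5, pos//5%2, pos%5//2, pos%5%2), assembling the output by prepending over the forward symbol order.
import Mathlib
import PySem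

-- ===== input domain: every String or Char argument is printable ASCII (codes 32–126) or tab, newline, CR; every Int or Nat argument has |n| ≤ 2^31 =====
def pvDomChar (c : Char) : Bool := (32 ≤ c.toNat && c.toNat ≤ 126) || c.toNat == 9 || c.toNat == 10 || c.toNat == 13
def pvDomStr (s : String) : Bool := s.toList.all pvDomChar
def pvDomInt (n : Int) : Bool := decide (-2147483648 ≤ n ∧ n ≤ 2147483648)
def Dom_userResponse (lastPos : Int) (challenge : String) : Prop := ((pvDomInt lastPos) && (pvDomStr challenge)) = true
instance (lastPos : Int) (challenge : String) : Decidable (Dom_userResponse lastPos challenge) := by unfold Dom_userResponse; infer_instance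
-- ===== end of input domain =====

-- B replaces A's list(set(..))+sort-by-index dedup with list(dict.fromkeys(..)) and A's
-- sequential remainder-carrying greedy loop with independent closed-form mixed-radix digits,
-- assembling the output by prepending over the forward symbol order.

-- ===== PORT A =====
-- tail decode of one ord value: c - ord('0') if c <= ord('9') else c - ord('W')
def pvDecA (c : Int) : Int := if c ≤ 57 then c - 48 else c - 87

def userResponse (lastPos : Int) (challenge : String) : String :=
  let l := challenge.toList
  -- tail = [ord(c) for c in challenge[32:34]]; decode; lastPos += 36*tail[0] + tail[1]
  let tail := (PySem.List.slice l (some 32) (some 34)).map (fun c => (c.toNat : Int))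
  let tail := tail.map pvDecA
  let pos := lastPos + 36 * (PySem.List.pyGetD tail 0 0) + PySem.List.pyGetD tail 1 0
  -- symbol = list(set(challenge)); symbol.sort(key=lambda c: challenge.index(c))
  let symbol := PySem.List.sorted (PySem.Set.ofList l)
      (fun c => (PySem.List.index? l c).getD 0) false
  -- symbol = reversed(symbol[:5])
  let symbol := (symbol.take 5).reverse
  -- for s, m in zip(symbol, multiplier): result += s * (lastPos // m); lastPos %= m
  let st := (symbol.zip [(50 : Int), 10, 5, 2, 1]).foldl
      (fun (st : List Char × Int) sm =>
        (st.1 ++ List.replicate (PySem.Int.floordiv st.2 sm.2).toNat sm.1,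
         PySem.Int.mod st.2 sm.2))
      ([], pos)
  String.ofList st.1

-- ===== PORT B =====
-- _dec(ch): o - 48 if o <= 57 else o - 87, o = ord(ch)
def pvDecB (ch : Char) : Int :=
  let o := (ch.toNat : Int); if o ≤ 57 then o - 48 else o - 87

def userResponse_alt (lastPos : Int) (challenge : String) : String :=
  let l := challenge.toList
  -- pos = lastPos + 36*_dec(challenge[32]) + _dec(challenge[33])
  let pos := lastPos + 36 * pvDecB (PySem.List.pyGetD l 32 ' ') + pvDecB (PySem.List.pyGetD l 33 ' ')
  -- counts = (pos//50, pos//10%5, pos//5%2, pos%5//2, pos%5%2)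
  let counts : List Int :=
    [PySem.Int.floordiv pos 50,
     PySem.Int.mod (PySem.Int.floordiv pos 10) 5,
     PySem.Int.mod (PySem.Int.floordiv pos 5) 2,
     PySem.Int.floordiv (PySem.Int.mod pos 5) 2,
     PySem.Int.mod (PySem.Int.mod pos 5) 2]
  -- syms = list(dict.fromkeys(challenge))[:5]; k = len(syms)
  let syms := (PySem.List.dedup l).take 5
  let k := syms.length
  -- for i, s in enumerate(syms): parts.insert(0, s * counts[k - 1 - i])
  let parts := (PySem.List.enumerate syms).foldl
      (fun (parts : List (List Char)) is =>
        List.replicate (PySem.List.pyGetD counts ((k : Int) - 1 - is.1) 0).toNat is.2 :: parts)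
      []
  String.ofList parts.flatten

-- ===== PRECONDITION & SPEC =====
-- A raises IndexError (tail[1]) when challenge has fewer than 34 characters; B raises there too.
def Pre_userResponse (lastPos : Int) (challenge : String) : Prop :=
  34 ≤ PySem.Str.len challenge
instance (lastPos : Int) (challenge : String) : Decidable (Pre_userResponse lastPos challenge) := by
  unfold Pre_userResponse; infer_instance

def pvWitness_userResponse : Int × String := (7, "qwertyuiopasdfghjklzxcvbnm0123456789")

def Spec_userResponse (lastPos : Int) (challenge : String) (out : String) : Prop :=
  out = userResponse_alt lastPos challenge
instance (lastPos : Int) (challenge : String) (out : String) : Decidable (Spec_userResponse lastPos challenge out) := by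
  unfold Spec_userResponse; infer_instance

-- ===== CLAIM (what is proved, stated in full; the proofs are below) =====
def Claim_equal_userResponse : Prop := ∀ (lastPos : Int) (challenge : String), Dom_userResponse lastPos challenge → Pre_userResponse lastPos challenge → Spec_userResponse lastPos challenge (userResponse lastPos challenge)

-- ===== LEMMAS AND PROOFS =====

-- the first-occurrence-index key A sorts by
def pvIdx (l : List Char) (c : Char) : Nat := (PySem.List.index? l c).getD 0

theorem pvIdx_lt_length {xs : List Char} {a : Char} (h : a ∈ xs) : pvIdx xs a < xs.length := by
  have hs : (PySem.List.index? xs a).isSome = true := (PySem.List.index?_isSome_iff xs a).2 h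
  obtain ⟨k, hk⟩ := Option.isSome_iff_exists.1 hs
  obtain ⟨hlt, -, -⟩ := PySem.List.getElem_of_index?_eq_some hk
  unfold pvIdx
  rw [hk]; exact hlt

theorem pvIdx_append_of_mem {xs : List Char} (t : List Char) {a : Char} (h : a ∈ xs) :
    pvIdx (xs ++ t) a = pvIdx xs a := by
  unfold pvIdx
  rw [PySem.List.index?_append_of_mem t h]

theorem pvIdx_append_self {xs : List Char} {c : Char} (h : c ∉ xs) :
    pvIdx (xs ++ [c]) c = xs.length := by
  unfold pvIdx
  rw [PySem.List.index?_append_singleton_self xs c h]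
  rfl

-- set(l) in first-insertion order is strictly increasing in first-occurrence index
theorem pv_ofList_pairwise (l : List Char) :
    (PySem.Set.ofList l).Pairwise (fun a b => pvIdx l a < pvIdx l b) := by
  induction l using List.reverseRecOn with
  | nil => simp [PySem.Set.ofList]
  | append_singleton xs c ih =>
    rw [PySem.Set.ofList_append_singleton, PySem.Set.add_eq_ite]
    have hpair : (PySem.Set.ofList xs).Pairwise
        (fun a b => pvIdx (xs ++ [c]) a < pvIdx (xs ++ [c]) b) :=
      ih.imp_of_mem (fun {a b} ha hb hab => by
        rw [pvIdx_append_of_mem [c] ((PySem.Set.mem_ofList xs a).1 ha),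
            pvIdx_append_of_mem [c] ((PySem.Set.mem_ofList xs b).1 hb)]
        exact hab)
    by_cases hx : c ∈ PySem.Set.ofList xs
    · rw [if_pos hx]; exact hpair
    · rw [if_neg hx]
      have hxm : c ∉ xs := fun h => hx ((PySem.Set.mem_ofList xs c).2 h)
      rw [List.pairwise_append]
      refine ⟨hpair, List.pairwise_singleton _ _, ?_⟩
      intro a ha b hb
      rw [List.mem_singleton] at hb; subst hb
      have haxs : a ∈ xs := (PySem.Set.mem_ofList xs a).1 ha
      rw [pvIdx_append_of_mem [b] haxs, pvIdx_append_self hxm]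
      exact pvIdx_lt_length haxs

-- hence A's sort is the identity on set(l)
theorem pv_sorted_ofList (l : List Char) :
    PySem.List.sorted (PySem.Set.ofList l)
      (fun c => (PySem.List.index? l c).getD 0) false = PySem.Set.ofList l :=
  PySem.List.sorted_eq_of_perm_of_pairwise_lt _ _ _ (List.Perm.refl _) (pv_ofList_pairwise l)

-- floor-division chain identities with positive, dividing moduli
theorem pv_d1 (p : Int) : p % 50 / 10 = p / 10 % 5 := by omega

theorem pv_d2 (p : Int) : p % 10 / 5 = p / 5 % 2 := by omega

-- A's remainder-carrying greedy loop = B's closed-form-digit prepend construction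
theorem pv_loops (syms : List Char) (h : syms.length ≤ 5) (pos : Int) :
    ((syms.reverse.zip [(50 : Int), 10, 5, 2, 1]).foldl
      (fun (st : List Char × Int) sm =>
        (st.1 ++ List.replicate (PySem.Int.floordiv st.2 sm.2).toNat sm.1,
         PySem.Int.mod st.2 sm.2)) ([], pos)).1
    = ((PySem.List.enumerate syms).foldl
        (fun (parts : List (List Char)) is =>
          List.replicate (PySem.List.pyGetD
              [PySem.Int.floordiv pos 50,
               PySem.Int.mod (PySem.Int.floordiv pos 10) 5,
               PySem.Int.mod (PySem.Int.floordiv pos 5) 2,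
               PySem.Int.floordiv (PySem.Int.mod pos 5) 2,
               PySem.Int.mod (PySem.Int.mod pos 5) 2]
              ((syms.length : Int) - 1 - is.1) 0).toNat is.2 :: parts)
        []).flatten := by
  rcases syms with _ | ⟨a, _ | ⟨b, _ | ⟨c, _ | ⟨d, _ | ⟨e, _ | ⟨f, t⟩⟩⟩⟩⟩⟩
  · rfl
  · simp [List.foldl, List.zip, PySem.List.enumerate, PySem.List.pyGetD,
      pv_d1, pv_d2]
  · simp [List.foldl, List.zip, PySem.List.enumerate, PySem.List.pyGetD,
      pv_d1, pv_d2]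
  · simp [List.foldl, List.zip, PySem.List.enumerate, PySem.List.pyGetD,
      pv_d1, pv_d2]
  · simp [List.foldl, List.zip, PySem.List.enumerate, PySem.List.pyGetD,
      pv_d1, pv_d2]
  · simp [List.foldl, List.zip, PySem.List.enumerate, PySem.List.pyGetD,
      pv_d1, pv_d2]
  · simp at h; omega

-- the [32:34] slice of a string of length ≥ 34 is the elements at 32 and 33
theorem pv_slice_pair (l : List Char) (h : 34 ≤ l.length) :
    PySem.List.slice l (some 32) (some 34)
      = [PySem.List.pyGetD l 32 ' ', PySem.List.pyGetD l 33 ' '] := by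
  have hs : PySem.List.slice l (some (32 : Int)) (some (34 : Int))
      = (l.drop 32).take (34 - 32) := by
    have := PySem.List.slice_natCast (xs := l) (a := 32) (b := 34)
    simpa using this
  have h32 : PySem.List.pyGetD l ((32 : Nat) : Int) ' ' = l.getD 32 ' ' :=
    PySem.List.pyGetD_natCast l 32 ' '
  have h33 : PySem.List.pyGetD l ((33 : Nat) : Int) ' ' = l.getD 33 ' ' :=
    PySem.List.pyGetD_natCast l 33 ' '
  rcases hd : l.drop 32 with _ | ⟨x, _ | ⟨y, r⟩⟩
  · have := congrArg List.length hd; simp at this; omega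
  · have := congrArg List.length hd; simp at this; omega
  · have hx : l.getD 32 ' ' = x := by
      have : (l.drop 32).getD 0 ' ' = x := by rw [hd]; rfl
      simpa [List.getD, List.getElem?_drop] using this
    have hy : l.getD 33 ' ' = y := by
      have : (l.drop 32).getD 1 ' ' = y := by rw [hd]; rfl
      simpa [List.getD, List.getElem?_drop] using this
    rw [hs, hd]
    simp only [List.take]
    rw [show ((32:Nat):Int) = (32:Int) from rfl] at h32
    rw [show ((33:Nat):Int) = (33:Int) from rfl] at h33
    rw [h32, h33, hx, hy]

-- ===== VERDICT (by name: the statement is the Claim_ definition above) =====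
theorem userResponse_spec : Claim_equal_userResponse := by
  intro lastPos challenge _ hpre
  unfold Spec_userResponse
  simp only [userResponse, userResponse_alt]
  have hlen : 34 ≤ challenge.toList.length := by
    have := PySem.Str.len_eq challenge
    unfold Pre_userResponse at hpre; omega
  rw [pv_slice_pair challenge.toList hlen, pv_sorted_ofList,
      PySem.List.dedup_eq_ofList]
  simp only [List.map_cons, List.map_nil]
  have h1 : ∀ x y : Int, PySem.List.pyGetD [x, y] 0 0 = x := fun _ _ => rfl
  have h2 : ∀ x y : Int, PySem.List.pyGetD [x, y] 1 0 = y := fun _ _ => rfl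
  rw [h1, h2]
  have hdec : ∀ c : Char, pvDecA (c.toNat : Int) = pvDecB c := fun c => rfl
  rw [hdec, hdec]
  congr 1
  exact pv_loops ((PySem.Set.ofList challenge.toList).take 5)
    (by simp [List.length_take]) _
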